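-- pv_equiv track=rewrite | github.com/Moana63/Algogo | sort_functions.py | frequency_minimizer
-- ===== SOURCE A (Python) =====
-- from collections import Counter
--
-- def frequency_minimizer(read: str, seed_size: int, len_window: int) -> dict:
--     """Returns the frequency of minimisers per read
--
--     Parameters
--     ----------
--     read : str
--         a DNA read
--     seed_size : int
--         size of the minimiser
--     len_window : int, optional
--         length of the window sliding on the sequence, by default 10
--
--     Returns
--     -------
--     dict
--         a dictionnary containing the minimisers encountered in the sequence as key and their number of occurences as values
--     """
--     list_minimisers = list()
--     i = 0
--     while i < (len(read)-len_window+1):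
--         minimiser = min([(read[i+j: i+j+seed_size], j)
--                         for j in range(len_window-seed_size+1)])
--         list_minimisers.append(minimiser[0])
--         # we jump to the next window not containing the last minimiser encountered, to reduce computation time
--         i += minimiser[1] + 1
--     return Counter(list_minimisers)
-- ===== SOURCE B (Python) =====
-- def frequency_minimizer(read: str, seed_size: int, len_window: int) -> dict:
--     """Same result, different algorithm: precompute every seed substring once,
--     build a sparse table of leftmost-argmin indices over power-of-two ranges,
--     then answer each window's minimiser by one O(1) range-min query while
--     performing the same jump i -> p+1 past the chosen minimiser position."""
--     counts = {}
--     limit = len(read) - len_window + 1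
--     if limit <= 0:
--         return counts
--     span = len_window - seed_size + 1
--     npos = limit + span - 1
--     seeds = [read[k:k + seed_size] for k in range(npos)]
--     # sparse table: table[l][k] = index of the leftmost minimal seed in [k, k+2^l)
--     L = span.bit_length() - 1
--     table = [list(range(npos))]
--     for l in range(L):
--         half = 1 << l
--         prev = table[l]
--         table.append([prev[k + half] if seeds[prev[k + half]] < seeds[prev[k]] else prev[k]
--                       for k in range(len(prev) - half)])
--     half = 1 << L
--     rowL = table[L]
--     i = 0
--     while i < limit:
--         a = rowL[i]
--         b = rowL[i + span - half]
--         p = b if seeds[b] < seeds[a] else a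
--         m = seeds[p]
--         counts[m] = counts.get(m, 0) + 1
--         i = p + 1
--     return counts
-- ===== Notes on version B (the rewrite author's own statement) =====
-- stated objective: alternative
-- what changed: B replaces A's per-window list-comprehension + min() rescans by precomputing all seed substrings once and building a sparse table of leftmost-argmin indices, answering each window's minimiser with one O(1) range-min query before the same jump past the chosen position; counts go straight into a dict instead of a final Counter pass.
import Mathlib
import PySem

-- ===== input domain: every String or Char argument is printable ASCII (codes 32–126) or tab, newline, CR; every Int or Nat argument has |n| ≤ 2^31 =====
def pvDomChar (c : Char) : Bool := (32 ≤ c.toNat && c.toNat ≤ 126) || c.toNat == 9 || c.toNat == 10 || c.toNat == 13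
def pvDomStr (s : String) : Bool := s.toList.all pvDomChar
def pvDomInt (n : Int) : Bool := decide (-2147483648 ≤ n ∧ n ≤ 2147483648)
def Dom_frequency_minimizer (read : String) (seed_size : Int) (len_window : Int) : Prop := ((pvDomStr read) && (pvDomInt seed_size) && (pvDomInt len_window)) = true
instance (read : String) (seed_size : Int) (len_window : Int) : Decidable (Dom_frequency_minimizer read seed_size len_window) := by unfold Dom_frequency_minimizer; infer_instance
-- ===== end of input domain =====

-- B replaces A's per-window min() rescan by a precomputed seed list plus a sparse table of
-- leftmost-argmin indices, answering each window with one O(1) range-min query (objective: alternative).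

-- ===== PORT A =====
-- the comprehension '[(read[i+j : i+j+seed_size], j) for j in range(len_window-seed_size+1)]'
def pvPairsA (cs : List Char) (seed i R : Int) : List (List Char × Int) :=
  (PySem.List.pyRange 0 R 1).map
    (fun j => (PySem.List.slice cs (some (i + j)) (some (i + j + seed)), j))

-- the while loop collecting list_minimisers; fuel only makes the recursion structural
-- (in Python i strictly increases each pass, so (len-W+1) passes are an upper bound)
def pvLoopA (cs : List Char) (seed W : Int) : Nat → Int → List (List Char) → List (List Char)
  | 0, _, acc => acc
  | fuel + 1, i, acc =>
    if i < (cs.length : Int) - W + 1 then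
      match PySem.List.min2? (pvPairsA cs seed i (W - seed + 1)) Prod.fst Prod.snd with
      | none => acc  -- Python: min([]) raises ValueError; excluded by Pre_
      | some m => pvLoopA cs seed W fuel (i + m.2 + 1) (acc ++ [m.1])
    else acc

def frequency_minimizer (read : String) (seed_size : Int) (len_window : Int) : List (String × Int) :=
  (PySem.Dict.counter
      (pvLoopA read.toList seed_size len_window
        ((read.toList.length : Int) - len_window + 1).toNat 0 [])).items.map
    (fun p => (String.ofList p.1, p.2))

-- ===== PORT B =====
-- 'seeds = [read[k:k+seed_size] for k in range(npos)]'
def pvSeedsB (cs : List Char) (s npos : Int) : List (List Char) :=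
  (PySem.List.pyRange 0 npos 1).map (fun k => PySem.List.slice cs (some k) (some (k + s)))

-- 'seeds[idx]'; inside Pre_ every stored index is in range, so the default is never reached
def pvSeedAt (seeds : List (List Char)) (idx : Int) : List Char :=
  PySem.List.pyGetD seeds idx []

-- the comprehension in Source B's table-building loop: next sparse-table row from prev
def pvNextRow (seeds : List (List Char)) (prev : List Int) (half : Int) : List Int :=
  (PySem.List.pyRange 0 ((prev.length : Int) - half) 1).map (fun k =>
    if pvSeedAt seeds (PySem.List.pyGetD prev (k + half) 0) < pvSeedAt seeds (PySem.List.pyGetD prev k 0)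
    then PySem.List.pyGetD prev (k + half) 0 else PySem.List.pyGetD prev k 0)

-- Source B's 'for l in range(L)' appends rows to table; only table[L] is used, so carry the last row
def pvRowL (seeds : List (List Char)) (npos : Int) : Nat → List Int
  | 0 => PySem.List.pyRange 0 npos 1
  | l + 1 => pvNextRow seeds (pvRowL seeds npos l) ((2 : Int) ^ l)

-- Source B's while loop: one O(1) two-entry range-min query per window, jump to p+1
def pvLoopB (seeds : List (List Char)) (rowL : List Int) (limit span half : Int) :
    Nat → Int → PySem.Dict (List Char) Int → PySem.Dict (List Char) Int
  | 0, _, d => d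
  | fuel + 1, i, d =>
    if i < limit then
      let a := PySem.List.pyGetD rowL i 0
      let b := PySem.List.pyGetD rowL (i + span - half) 0
      let p := if pvSeedAt seeds b < pvSeedAt seeds a then b else a
      let m := pvSeedAt seeds p
      pvLoopB seeds rowL limit span half fuel (p + 1) (d.insert m (d.getD m 0 + 1))
    else d

def frequency_minimizer_alt (read : String) (seed_size : Int) (len_window : Int) : List (String × Int) :=
  let cs := read.toList
  let limit := (cs.length : Int) - len_window + 1
  if limit ≤ 0 then []
  else
    let span := len_window - seed_size + 1
    let npos := limit + span - 1
    let seeds := pvSeedsB cs seed_size npos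
    let L := PySem.Int.bitLength span - 1   -- span.bit_length() - 1 (span ≥ 1 inside Pre_)
    (pvLoopB seeds (pvRowL seeds npos L) limit span ((2 : Int) ^ L) limit.toNat 0
        PySem.Dict.empty).items.map (fun p => (String.ofList p.1, p.2))

-- ===== PRECONDITION & SPEC =====
-- Pre_ excludes exactly the inputs where A raises ValueError (min of an empty list):
-- at least one window exists (len_window ≤ len(read)) but seed_size > len_window.
def Pre_frequency_minimizer (read : String) (seed_size : Int) (len_window : Int) : Prop :=
  ¬ (len_window ≤ PySem.Str.len read ∧ len_window < seed_size)
instance (read : String) (seed_size : Int) (len_window : Int) : Decidable (Pre_frequency_minimizer read seed_size len_window) := by unfold Pre_frequency_minimizer; infer_instance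

def pvWitness_frequency_minimizer : String × Int × Int := ("ACGTACGT", 3, 5)

def Spec_frequency_minimizer (read : String) (seed_size : Int) (len_window : Int) (out : List (String × Int)) : Prop := out = frequency_minimizer_alt read seed_size len_window
instance (read : String) (seed_size : Int) (len_window : Int) (out : List (String × Int)) : Decidable (Spec_frequency_minimizer read seed_size len_window out) := by unfold Spec_frequency_minimizer; infer_instance

-- ===== CLAIM (what is proved, stated in full; the proofs are below) =====
def Claim_equal_frequency_minimizer : Prop := ∀ (read : String) (seed_size : Int) (len_window : Int), Dom_frequency_minimizer read seed_size len_window → Pre_frequency_minimizer read seed_size len_window → Spec_frequency_minimizer read seed_size len_window (frequency_minimizer read seed_size len_window)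

-- ===== LEMMAS AND PROOFS =====

-- the seed substring at absolute position k (proof-side abbreviation)
def pvSeed (cs : List Char) (s k : Int) : List Char :=
  PySem.List.slice cs (some k) (some (k + s))

-- 'p is the leftmost position of a lexicographically minimal seed in [lo, hi)'
def IsLAM (cs : List Char) (s lo hi p : Int) : Prop :=
  lo ≤ p ∧ p < hi ∧ (∀ j, lo ≤ j → j < hi → ¬ pvSeed cs s j < pvSeed cs s p) ∧
    (∀ j, lo ≤ j → j < p → pvSeed cs s p < pvSeed cs s j)

theorem IsLAM_unique {cs : List Char} {s lo hi p q : Int}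
    (hp : IsLAM cs s lo hi p) (hq : IsLAM cs s lo hi q) : p = q := by
  obtain ⟨hp1, hp2, hp3, hp4⟩ := hp
  obtain ⟨hq1, hq2, hq3, hq4⟩ := hq
  rcases lt_trichotomy p q with h | h | h
  · exact absurd (hq4 p hp1 h) (hp3 q hq1 hq2)
  · exact h
  · exact absurd (hp4 q hq1 h) (hq3 p hp1 hp2)

theorem IsLAM_singleton (cs : List Char) (s k : Int) : IsLAM cs s k (k + 1) k := by
  refine ⟨le_refl k, by omega, ?_, ?_⟩
  · intro j h1 h2
    have : j = k := by omega
    subst this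
    exact lt_irrefl _
  · intro j h1 h2
    omega

-- combining leftmost argmins of two (possibly overlapping) covering ranges, keeping the left on ties
theorem IsLAM_combine {cs : List Char} {s lo a b hi p q : Int}
    (hba : b ≤ a) (hahi : a ≤ hi) (hlob : lo ≤ b)
    (hp : IsLAM cs s lo a p) (hq : IsLAM cs s b hi q) :
    IsLAM cs s lo hi (if pvSeed cs s q < pvSeed cs s p then q else p) := by
  obtain ⟨hp1, hp2, hp3, hp4⟩ := hp
  obtain ⟨hq1, hq2, hq3, hq4⟩ := hq
  by_cases h : pvSeed cs s q < pvSeed cs s p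
  · rw [if_pos h]
    refine ⟨by omega, hq2, ?_, ?_⟩
    · intro j hj1 hj2 hcon
      by_cases hja : j < a
      · exact hp3 j hj1 hja (lt_trans hcon h)
      · exact hq3 j (by omega) hj2 hcon
    · intro j hj1 hj2
      by_cases hjb : j < b
      · exact lt_of_lt_of_le h (Std.not_lt.mp (hp3 j hj1 (by omega)))
      · exact hq4 j (by omega) hj2
  · rw [if_neg h]
    refine ⟨hp1, by omega, ?_, ?_⟩
    · intro j hj1 hj2 hcon
      by_cases hja : j < a
      · exact hp3 j hj1 hja hcon
      · exact h (lt_of_le_of_lt (Std.not_lt.mp (hq3 j (by omega) hj2)) hcon)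
    · intro j hj1 hj2
      exact hp4 j hj1 hj2

-- B's running argmin over a strictly increasing list of offsets computes A's min()
-- over (substring, offset) tuples: the offset tie-break of the tuple order never
-- fires, because the stored offset is smaller than every offset still to come.
theorem pvArgmin_eq_min2_aux (f : Int → List Char) (js : List Int)
    (hjs : js.Pairwise (· < ·)) (b : Option (List Char × Int))
    (hb : ∀ m, b = some m → ∀ j ∈ js, m.2 < j) :
    js.foldl
      (fun best j =>
        match best with
        | none => some (f j, j)
        | some bb => if f j < bb.1 then some (f j, j) else some bb) b
    = js.foldl
      (fun acc j =>
        match acc with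
        | none => some (f j, j)
        | some m =>
          if (decide (f j < m.1) || !decide (m.1 < f j) && decide (j < m.2)) = true
          then some (f j, j) else some m) b := by
  induction js generalizing b with
  | nil => rfl
  | cons j js ih =>
    rw [List.pairwise_cons] at hjs
    simp only [List.foldl_cons]
    cases b with
    | none =>
      exact ih hjs.2 (some (f j, j)) (by intro m hm j' hj'; cases hm; exact hjs.1 j' hj')
    | some m =>
      have hmj : m.2 < j := hb m rfl j (List.mem_cons_self ..)
      have hdec : decide (j < m.2) = false := by
        simp only [decide_eq_false_iff_not]; omega
      simp only [hdec, Bool.and_false, Bool.or_false]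
      by_cases h : f j < m.1
      · simp only [decide_eq_true_eq, if_pos h]
        exact ih hjs.2 (some (f j, j)) (by intro m' hm' j' hj'; cases hm'; exact hjs.1 j' hj')
      · simp only [decide_eq_true_eq, if_neg h]
        exact ih hjs.2 (some m)
          (by intro m' hm' j' hj'; cases hm'; exact lt_trans hmj (hjs.1 j' hj'))

-- the simple running argmin over offsets 0..R-1 finds the leftmost minimal seed of [i, i+R)
theorem pvArgmin_isLAM (cs : List Char) (s i : Int) (n : Nat) (hn : 1 ≤ n) :
    ∃ p, IsLAM cs s i (i + n) p ∧
      (PySem.List.pyRange 0 n 1).foldl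
        (fun best j =>
          match best with
          | none => some (pvSeed cs s (i + j), j)
          | some bb => if pvSeed cs s (i + j) < bb.1 then some (pvSeed cs s (i + j), j) else some bb)
        none = some (pvSeed cs s p, p - i) := by
  induction n with
  | zero => omega
  | succ n ih =>
    by_cases hn1 : n = 0
    · subst hn1
      refine ⟨i, ?_, ?_⟩
      · have h1 : ((1 : Nat) : Int) = 1 := by norm_num
        rw [h1]; exact IsLAM_singleton cs s i
      · have : PySem.List.pyRange 0 ((1:Nat) : Int) 1 = [0] := by
          have := PySem.List.pyRange_one_singleton (0 : Int)
          simpa using this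
        rw [this]
        simp
    · obtain ⟨p, hLAM, heq⟩ := ih (by omega)
      have hcast : ((n + 1 : Nat) : Int) = (n : Int) + 1 := by push_cast; ring
      have hsplit : PySem.List.pyRange 0 ((n + 1 : Nat) : Int) 1
          = PySem.List.pyRange 0 (n : Int) 1 ++ [(n : Int)] := by
        rw [hcast, PySem.List.pyRange_one_succ_right (by positivity)]
      rw [hsplit, List.foldl_append, heq]
      have hhi : i + ((n + 1 : Nat) : Int) = (i + (n : Int)) + 1 := by push_cast; ring
      refine ⟨if pvSeed cs s (i + (n:Int)) < pvSeed cs s p then i + (n:Int) else p, ?_, ?_⟩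
      · rw [hhi]
        have := IsLAM_combine (cs := cs) (s := s) (lo := i) (a := i + (n:Int))
          (b := i + (n:Int)) (hi := i + (n:Int) + 1) (p := p) (q := i + (n:Int))
          le_rfl (by omega) (by omega) hLAM (IsLAM_singleton cs s (i + (n:Int)))
        exact this
      · simp only [List.foldl_cons, List.foldl_nil]
        by_cases h : pvSeed cs s (i + (n:Int)) < pvSeed cs s p
        · rw [if_pos h, if_pos h]
          have he : i + (n:Int) - i = (n:Int) := by ring
          rw [he]
        · rw [if_neg h, if_neg h]

theorem pvMinA_isLAM (cs : List Char) (s i : Int) (R : Int) (hR : 1 ≤ R) :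
    ∃ p, IsLAM cs s i (i + R) p ∧
      PySem.List.min2? (pvPairsA cs s i R) Prod.fst Prod.snd = some (pvSeed cs s p, p - i) := by
  have hRn : R = ((R.toNat : Nat) : Int) := by omega
  have hmin : PySem.List.min2? (pvPairsA cs s i R) Prod.fst Prod.snd
      = (PySem.List.pyRange 0 R 1).foldl
        (fun best j =>
          match best with
          | none => some (pvSeed cs s (i + j), j)
          | some bb => if pvSeed cs s (i + j) < bb.1 then some (pvSeed cs s (i + j), j) else some bb)
        none := by
    unfold pvPairsA PySem.List.min2?
    rw [List.foldl_map]
    refine Eq.trans (PySem.List.foldl_congr_mem _ _ _ _ ?_)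
      (Eq.trans
        (pvArgmin_eq_min2_aux (fun j => pvSeed cs s (i + j))
          (PySem.List.pyRange 0 R 1) (PySem.List.pairwise_lt_pyRange_one 0 R) none
          (fun m hm => by cases hm)).symm
        (PySem.List.foldl_congr_mem _ _ _ _ ?_).symm)
    · intro acc j _; cases acc <;> rfl
    · intro acc j _; cases acc <;> rfl
  obtain ⟨p, hLAM, heq⟩ := pvArgmin_isLAM cs s i R.toNat (by omega)
  refine ⟨p, by rw [hRn]; exact hLAM, ?_⟩
  rw [hmin, hRn, heq]

theorem pvSeedAt_seeds (cs : List Char) (s npos k : Int) (h0 : 0 ≤ k) (h1 : k < npos) :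
    pvSeedAt (pvSeedsB cs s npos) k = pvSeed cs s k := by
  unfold pvSeedAt pvSeedsB pvSeed
  rw [PySem.List.pyGetD_map_pyRange_of_nonneg _ _ _ _ h0 h1]

-- sparse-table row invariant: row e has an entry for every k with k + 2^e ≤ npos,
-- and that entry is the leftmost argmin of [k, k + 2^e)
def RowInv (cs : List Char) (s npos : Int) (row : List Int) (e : Nat) : Prop :=
  (row.length : Int) = npos - 2 ^ e + 1 ∧
  ∀ k : Int, 0 ≤ k → k < npos - 2 ^ e + 1 →
    IsLAM cs s k (k + 2 ^ e) (PySem.List.pyGetD row k 0) ∧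
    0 ≤ PySem.List.pyGetD row k 0 ∧ PySem.List.pyGetD row k 0 < npos

theorem pvRowL_inv (cs : List Char) (s npos : Int) (L : Nat)
    (hnp : (2 : Int) ^ L ≤ npos) :
    ∀ e : Nat, e ≤ L → RowInv cs s npos (pvRowL (pvSeedsB cs s npos) npos e) e := by
  intro e
  induction e with
  | zero =>
    intro _
    have hpos : (0 : Int) < npos := lt_of_lt_of_le (by positivity) hnp
    constructor
    · rw [pvRowL]
      rw [PySem.List.length_pyRange_one]
      omega
    · intro k hk0 hk1
      have hklen : k < ((PySem.List.pyRange 0 npos 1).length : Int) := by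
        rw [PySem.List.length_pyRange_one]; omega
      rw [pvRowL, PySem.List.pyGetD_eq_getElem _ _ hk0 hklen,
        PySem.List.getElem_pyRange_one]
      have hkk : 0 + (k.toNat : Int) = k := by omega
      rw [hkk]
      refine ⟨by simpa using IsLAM_singleton cs s k, hk0, by omega⟩
  | succ e ih =>
    intro hLe
    have hee : e ≤ L := by omega
    obtain ⟨hlen, hent⟩ := ih hee
    have hmono : (2:Int) ^ (e+1) ≤ 2 ^ L := by
      have := pow_le_pow_right₀ (by norm_num : (1:Int) ≤ 2) hLe
      exact this
    have h2e : (0:Int) < 2 ^ e := by positivity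
    have hsucc : (2:Int) ^ (e+1) = 2 ^ e * 2 := by rw [pow_succ]
    constructor
    · simp only [pvRowL]
      unfold pvNextRow
      rw [List.length_map, PySem.List.length_pyRange_one]
      omega
    · intro k hk0 hk1
      simp only [pvRowL]
      unfold pvNextRow
      rw [PySem.List.pyGetD_map_pyRange_of_nonneg _ _ _ _ hk0 (by omega)]
      have hA := hent k hk0 (by omega)
      have hB := hent (k + 2^e) (by omega) (by omega)
      set a := PySem.List.pyGetD (pvRowL (pvSeedsB cs s npos) npos e) k 0 with ha
      set b := PySem.List.pyGetD (pvRowL (pvSeedsB cs s npos) npos e) (k + 2^e) 0 with hb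
      have hsa : pvSeedAt (pvSeedsB cs s npos) a = pvSeed cs s a :=
        pvSeedAt_seeds cs s npos a hA.2.1 hA.2.2
      have hsb : pvSeedAt (pvSeedsB cs s npos) b = pvSeed cs s b :=
        pvSeedAt_seeds cs s npos b hB.2.1 hB.2.2
      rw [hsa, hsb]
      have hcomb := IsLAM_combine (cs := cs) (s := s) (lo := k) (a := k + 2^e)
        (b := k + 2^e) (hi := k + 2^e + 2^e) le_rfl (by omega) (by omega) hA.1 hB.1
      have hhi : k + (2:Int)^(e+1) = k + 2^e + 2^e := by rw [hsucc]; ring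
      rw [hhi]
      refine ⟨hcomb, ?_⟩
      by_cases h : pvSeed cs s b < pvSeed cs s a
      · rw [if_pos h]; exact hB.2
      · rw [if_neg h]; exact hA.2

-- ===== loop equality =====

-- A's loop with a non-empty accumulator just prepends it
theorem pvLoopA_acc (cs : List Char) (seed W : Int) (fuel : Nat) :
    ∀ (i : Int) (acc : List (List Char)),
      pvLoopA cs seed W fuel i acc = acc ++ pvLoopA cs seed W fuel i [] := by
  induction fuel with
  | zero => intro i acc; simp [pvLoopA]
  | succ fuel ih =>
    intro i acc
    simp only [pvLoopA]
    split
    · cases PySem.List.min2? (pvPairsA cs seed i (W - seed + 1)) Prod.fst Prod.snd with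
      | none => simp
      | some m =>
        dsimp only
        rw [ih (i + m.2 + 1) (acc ++ [m.1]), ih (i + m.2 + 1) ([] ++ [m.1])]
        simp
    · simp

-- B's loop is: run A's loop, then count each collected minimiser into the dict
theorem pvLoopB_eq_count_loopA (cs : List Char) (s W : Int)
    (hspan : 1 ≤ W - s + 1) (hlim : 0 < (cs.length : Int) - W + 1) (fuel : Nat) :
    ∀ (i : Int) (d : PySem.Dict (List Char) Int), 0 ≤ i →
      pvLoopB (pvSeedsB cs s ((cs.length : Int) - W + 1 + (W - s + 1) - 1))
          (pvRowL (pvSeedsB cs s ((cs.length : Int) - W + 1 + (W - s + 1) - 1))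
            ((cs.length : Int) - W + 1 + (W - s + 1) - 1) (PySem.Int.bitLength (W - s + 1) - 1))
          ((cs.length : Int) - W + 1) (W - s + 1)
          ((2 : Int) ^ (PySem.Int.bitLength (W - s + 1) - 1)) fuel i d
        = (pvLoopA cs s W fuel i []).foldl
            (fun d x => d.insert x (d.getD x 0 + 1)) d := by
  -- abbreviations
  set limit : Int := (cs.length : Int) - W + 1 with hlimdef
  set span : Int := W - s + 1 with hspandef
  set npos : Int := limit + span - 1 with hnposdef
  set L : Nat := PySem.Int.bitLength span - 1 with hLdef
  -- 2^L ≤ span < 2^(L+1)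
  have hspan0 : span ≠ 0 := by omega
  have hbl1 : 1 ≤ PySem.Int.bitLength span := by
    by_contra h
    have h0 : PySem.Int.bitLength span = 0 := by omega
    have := PySem.Int.lt_two_pow_bitLength span
    rw [h0] at this
    simp at this
    omega
  have habs : (span.natAbs : Int) = span := Int.natAbs_of_nonneg (by omega)
  have h2L : (2 : Int) ^ L ≤ span := by
    have h := PySem.Int.two_pow_bitLength_le span hspan0
    have h' : ((2 ^ L : Nat) : Int) ≤ (span.natAbs : Int) := by
      rw [hLdef]; exact_mod_cast h
    rw [habs] at h'
    push_cast at h'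
    exact h'
  have h2L2 : span < 2 * (2 : Int) ^ L := by
    have h := PySem.Int.lt_two_pow_bitLength span
    have hLL : L + 1 = PySem.Int.bitLength span := by omega
    have h' : (span.natAbs : Int) < ((2 ^ (L + 1) : Nat) : Int) := by
      rw [hLL]; exact_mod_cast h
    rw [habs] at h'
    push_cast at h'
    have he : (2 : Int) ^ (L + 1) = 2 * 2 ^ L := by ring
    rw [he] at h'
    exact h'
  have hnp : (2 : Int) ^ L ≤ npos := by omega
  have hrow := pvRowL_inv cs s npos L hnp L le_rfl
  induction fuel with
  | zero => intro i d _; simp [pvLoopA, pvLoopB]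
  | succ fuel ih =>
    intro i d hi0
    by_cases hiw : i < limit
    · -- one window step
      have hiub : i ≤ limit - 1 := by omega
      -- A side: the chosen minimiser
      obtain ⟨pA, hpA, hmin⟩ := pvMinA_isLAM cs s i span hspan
      -- B side: the two table entries
      have hA := hrow.2 i hi0 (by omega)
      have hB := hrow.2 (i + span - 2 ^ L) (by omega) (by omega)
      set a : Int := PySem.List.pyGetD
        (pvRowL (pvSeedsB cs s npos) npos L) i 0 with hadef
      set b : Int := PySem.List.pyGetD
        (pvRowL (pvSeedsB cs s npos) npos L) (i + span - 2 ^ L) 0 with hbdef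
      have hBlam : IsLAM cs s (i + span - 2 ^ L) (i + span) b := by
        have := hB.1
        have he : i + span - 2 ^ L + 2 ^ L = i + span := by ring
        rwa [he] at this
      have hcomb := IsLAM_combine (cs := cs) (s := s) (lo := i) (a := i + 2 ^ L)
        (b := i + span - 2 ^ L) (hi := i + span)
        (by omega) (by omega) (by omega) hA.1 hBlam
      set p : Int := if pvSeed cs s b < pvSeed cs s a then b else a with hpdef
      have hpeq : p = pA := IsLAM_unique hcomb hpA
      have hpb0 : 0 ≤ p := by rw [hpdef]; split <;> omega
      have hpbn : p < npos := by
        have := hcomb.2.1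
        omega
      -- seed lookups
      have hsa : pvSeedAt (pvSeedsB cs s npos) a = pvSeed cs s a :=
        pvSeedAt_seeds cs s npos a hA.2.1 hA.2.2
      have hsb : pvSeedAt (pvSeedsB cs s npos) b = pvSeed cs s b :=
        pvSeedAt_seeds cs s npos b hB.2.1 hB.2.2
      have hsp : pvSeedAt (pvSeedsB cs s npos) p = pvSeed cs s p :=
        pvSeedAt_seeds cs s npos p hpb0 hpbn
      -- unfold one step of B
      rw [pvLoopB, if_pos hiw]
      simp only [← hadef, ← hbdef, hsa, hsb, ← hpdef, hsp]
      -- unfold one step of A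
      rw [pvLoopA, if_pos hiw, hmin]
      dsimp only
      rw [pvLoopA_acc cs s W fuel (i + (pA - i) + 1) ([] ++ [pvSeed cs s pA])]
      simp only [List.nil_append, List.cons_append, List.foldl_cons]
      have hnext : i + (pA - i) + 1 = p + 1 := by omega
      rw [hnext, ← hpeq]
      exact ih (p + 1) (d.insert (pvSeed cs s p) (d.getD (pvSeed cs s p) 0 + 1)) (by omega)
    · rw [pvLoopB, if_neg hiw, pvLoopA, if_neg hiw]
      simp

-- ===== VERDICT (by name: the statement is the Claim_ definition above) =====
theorem frequency_minimizer_spec : Claim_equal_frequency_minimizer := by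
  intro read s W _ hPre
  unfold Spec_frequency_minimizer frequency_minimizer frequency_minimizer_alt
  have hlen : PySem.Str.len read = (read.toList.length : Int) := by simp [pysem]
  by_cases hl : (read.toList.length : Int) - W + 1 ≤ 0
  · rw [if_pos hl]
    rw [Int.toNat_of_nonpos hl]
    simp [pvLoopA, PySem.Dict.counter, PySem.Dict.empty]
  · rw [if_neg hl]
    have hspan : 1 ≤ W - s + 1 := by
      unfold Pre_frequency_minimizer at hPre
      rw [hlen] at hPre
      omega
    show _ = List.map (fun p => (String.ofList p.1, p.2))
      (pvLoopB (pvSeedsB read.toList s ((read.toList.length : Int) - W + 1 + (W - s + 1) - 1))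
        (pvRowL (pvSeedsB read.toList s ((read.toList.length : Int) - W + 1 + (W - s + 1) - 1))
          ((read.toList.length : Int) - W + 1 + (W - s + 1) - 1) (PySem.Int.bitLength (W - s + 1) - 1))
        ((read.toList.length : Int) - W + 1) (W - s + 1)
        ((2 : Int) ^ (PySem.Int.bitLength (W - s + 1) - 1))
        ((read.toList.length : Int) - W + 1).toNat 0 PySem.Dict.empty).items
    rw [pvLoopB_eq_count_loopA read.toList s W hspan (by omega) _ 0 PySem.Dict.empty le_rfl]
    rw [PySem.Dict.foldl_insert_getD_add_one_eq_counter]
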